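-- pv_equiv track=rewrite | github.com/Policarp-wq/PackageAnalyzer | visualizer.py | generate_graph_code
-- ===== SOURCE A (Python) =====
-- def generate_graph_code(dict):
--     res = 'flowchart TD;\n'
--     cnt = 0
--     ids = {}
--
--     for key in dict.keys():
--         if dict[key] is None:
--             continue
--         if key in ids:
--             cur_id = ids[key]
--         else:
--             cur_id = f'id{cnt}'
--             ids[key] = cur_id
--             cnt += 1
--         for dep in dict[key]:
--             if dep in ids:
--                 dep_id = ids[dep]
--             else:
--                 dep_id = f'id{cnt}'
--                 ids[dep] = dep_id
--                 cnt += 1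
--             res += f'\t{cur_id}["{key}"] --> {dep_id}["{dep}"];\n'
--     return res
-- ===== SOURCE B (Python) =====
-- def generate_graph_code(dict):
--     # pass 1: collect names (key before its deps, skipping None entries) in first-seen order
--     order = []
--     seen = set()
--     for key, deps in dict.items():
--         if deps is None:
--             continue
--         for name in (key, *deps):
--             if name not in seen:
--                 seen.add(name)
--                 order.append(name)
--     ids = {name: f'id{i}' for i, name in enumerate(order)}
--     # pass 2: render
--     lines = [f'\t{ids[key]}["{key}"] --> {ids[dep]}["{dep}"];\n'
--              for key, deps in dict.items() if deps is not None
--              for dep in deps]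
--     return 'flowchart TD;\n' + ''.join(lines)
-- ===== Notes on version B (the rewrite author's own statement) =====
-- stated objective: alternative
-- what changed: A interleaves id allocation with rendering in one nested loop over a mutable (res, cnt, ids) state; B makes two separate passes: a first pass collects the distinct node names in first-seen order (key before its deps, skipping None entries) and builds the id table by enumeration, then a second pass renders all edge lines by pure lookup and joins them onto the header.
import Mathlib
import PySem

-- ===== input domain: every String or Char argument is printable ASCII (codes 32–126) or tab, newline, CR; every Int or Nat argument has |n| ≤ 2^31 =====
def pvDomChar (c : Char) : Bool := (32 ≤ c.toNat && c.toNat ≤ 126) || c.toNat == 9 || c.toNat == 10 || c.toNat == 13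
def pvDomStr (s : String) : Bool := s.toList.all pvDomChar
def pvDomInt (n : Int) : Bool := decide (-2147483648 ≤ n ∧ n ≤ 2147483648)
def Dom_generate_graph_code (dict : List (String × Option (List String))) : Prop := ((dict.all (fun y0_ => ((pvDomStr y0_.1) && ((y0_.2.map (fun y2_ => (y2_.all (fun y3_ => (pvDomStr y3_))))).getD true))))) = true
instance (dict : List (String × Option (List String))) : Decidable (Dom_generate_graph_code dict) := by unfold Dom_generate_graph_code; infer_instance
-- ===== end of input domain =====

-- B replaces A's single interleaved loop (mutable res/cnt/ids state) by two passes: collect distinct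
-- names and build the id table first, then render all edge lines by pure lookup and join them.


-- ===== PORT A =====
-- inner 'for dep in dict[key]' loop body of A (state = (res, cnt, ids))
def pvAInner (key cur_id : String) (st : String × Int × PySem.Dict String String) (dep : String) :
    String × Int × PySem.Dict String String :=
  match st.2.2.get? dep with
  | some dep_id =>
      (st.1 ++ "\t" ++ cur_id ++ "[\"" ++ key ++ "\"] --> " ++ dep_id ++ "[\"" ++ dep ++ "\"];\n",
       st.2.1, st.2.2)
  | none =>
      (st.1 ++ "\t" ++ cur_id ++ "[\"" ++ key ++ "\"] --> " ++ ("id" ++ PySem.Int.toStr st.2.1) ++ "[\"" ++ dep ++ "\"];\n",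
       st.2.1 + 1, st.2.2.insert dep ("id" ++ PySem.Int.toStr st.2.1))

-- outer 'for key in dict.keys()' loop body of A
def pvAStep (st : String × Int × PySem.Dict String String) (kv : String × Option (List String)) :
    String × Int × PySem.Dict String String :=
  match kv.2 with
  | none => st
  | some deps =>
    match st.2.2.get? kv.1 with
    | some cur_id => deps.foldl (pvAInner kv.1 cur_id) st
    | none =>
        let cur_id := "id" ++ PySem.Int.toStr st.2.1
        deps.foldl (pvAInner kv.1 cur_id) (st.1, st.2.1 + 1, st.2.2.insert kv.1 cur_id)

def generate_graph_code (dict : List (String × Option (List String))) : String :=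
  (dict.foldl pvAStep ("flowchart TD;\n", 0, PySem.Dict.empty)).1

-- ===== PORT B =====
-- pass 1 loop body: add key then its deps to the first-seen-order set (order ≡ seen as a list)
def pvCollectStep (seen : PySem.Set String) (kv : String × Option (List String)) : PySem.Set String :=
  match kv.2 with
  | none => seen
  | some deps => (kv.1 :: deps).foldl PySem.Set.add seen

def pvCollect (dict : List (String × Option (List String))) : List String :=
  dict.foldl pvCollectStep PySem.Set.empty

-- ids = {name: f'id{i}' for i, name in enumerate(order)}
def pvIds (order : List String) : PySem.Dict String String :=
  (PySem.List.enumerate order).foldl (fun d p => d.insert p.2 ("id" ++ PySem.Int.toStr p.1)) PySem.Dict.empty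

-- ids[key]/ids[dep] cannot raise KeyError (every rendered name was collected in pass 1), so getD's default is unreachable
def pvLine (ids : PySem.Dict String String) (key dep : String) : String :=
  "\t" ++ ids.getD key "" ++ "[\"" ++ key ++ "\"] --> " ++ ids.getD dep "" ++ "[\"" ++ dep ++ "\"];\n"

-- pass 2 list-comprehension step
def pvBLineStep (ids : PySem.Dict String String) (acc : List String) (kv : String × Option (List String)) :
    List String :=
  match kv.2 with
  | none => acc
  | some deps => acc ++ deps.map (pvLine ids kv.1)

def generate_graph_code_alt (dict : List (String × Option (List String))) : String :=
  "flowchart TD;\n" ++ PySem.Str.join "" (dict.foldl (pvBLineStep (pvIds (pvCollect dict))) [])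

-- ===== PRECONDITION & SPEC =====
-- Pre_ excludes association lists with duplicate keys, which do not correspond to any Python dict
-- (the dict collapses duplicates, so list iteration has no Python counterpart on them).
def Pre_generate_graph_code (dict : List (String × Option (List String))) : Prop :=
  (dict.map Prod.fst).Nodup
instance (dict : List (String × Option (List String))) : Decidable (Pre_generate_graph_code dict) := by
  unfold Pre_generate_graph_code; infer_instance
def pvWitness_generate_graph_code : (List (String × Option (List String))) :=
  [("a", some ["b", "a"]), ("c", none), ("b", some [])]
def Spec_generate_graph_code (dict : List (String × Option (List String))) (out : String) : Prop :=
  out = generate_graph_code_alt dict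
instance (dict : List (String × Option (List String))) (out : String) : Decidable (Spec_generate_graph_code dict out) := by
  unfold Spec_generate_graph_code; infer_instance

-- ===== CLAIM (what is proved, stated in full; the proofs are below) =====
def Claim_equal_generate_graph_code : Prop := ∀ (dict : List (String × Option (List String))), Dom_generate_graph_code dict → Pre_generate_graph_code dict → Spec_generate_graph_code dict (generate_graph_code dict)

-- ===== LEMMAS AND PROOFS =====

-- the edge lines contributed by one dict entry, looked up in a fixed id table
def pvLines (ids : PySem.Dict String String) (kv : String × Option (List String)) : List String :=
  match kv.2 with
  | none => []
  | some deps => deps.map (pvLine ids kv.1)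

lemma pv_join_flatten (l : List (List Char)) : PySem.Chars.join [] l = l.flatten := by
  induction l with
  | nil => rfl
  | cons x xs ih => cases xs <;> simp_all [PySem.Chars.join, List.intercalate]

lemma pv_foldl_append_toList (l : List String) (res : String) :
    (l.foldl (· ++ ·) res).toList = res.toList ++ (l.map String.toList).flatten := by
  induction l generalizing res with
  | nil => simp
  | cons x xs ih => simp [ih]

lemma pv_append_join (l : List String) (res : String) :
    res ++ PySem.Str.join "" l = l.foldl (· ++ ·) res := by
  apply String.toList_inj.mp
  simp [PySem.Str.join, pv_join_flatten, pv_foldl_append_toList]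

lemma pv_getD (d : PySem.Dict String String) (k : String) : d.getD k "" = (d.get? k).getD "" := by
  simp [PySem.Dict.getD]

lemma pv_index_none (s : List String) (k : String) (h : k ∉ s) : PySem.List.index? s k = none :=
  (PySem.List.index?_eq_none_iff (xs := s) (v := k)).mpr h

lemma pv_index_some (s : List String) (k : String) (h : k ∈ s) :
    ∃ i, PySem.List.index? s k = some i :=
  Option.isSome_iff_exists.mp ((PySem.List.index?_isSome_iff (xs := s) (v := k)).mpr h)

lemma pv_add_of_mem (s : PySem.Set String) (x : String) (h : x ∈ s) : PySem.Set.add s x = s := by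
  simp [PySem.Set.add, PySem.Set.contains, h]

lemma pv_add_of_not_mem (s : PySem.Set String) (x : String) (h : x ∉ s) :
    PySem.Set.add s x = s ++ [x] := by
  simp [PySem.Set.add, PySem.Set.contains, h]

lemma pv_adds_ext (deps : List String) : ∀ s : List String,
    ∃ t, deps.foldl PySem.Set.add s = s ++ t := by
  induction deps with
  | nil => exact fun s => ⟨[], by simp⟩
  | cons d ds ih =>
    intro s
    by_cases h : d ∈ s
    · simpa [pv_add_of_mem s d h] using ih s
    · obtain ⟨t, ht⟩ := ih (s ++ [d])
      refine ⟨[d] ++ t, ?_⟩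
      rw [List.foldl_cons, pv_add_of_not_mem s d h, ht, List.append_assoc]

lemma pv_adds_nodup (deps : List String) : ∀ s : List String,
    s.Nodup → (deps.foldl PySem.Set.add s).Nodup := by
  induction deps with
  | nil => exact fun s h => h
  | cons d ds ih => exact fun s h => ih _ (PySem.Set.nodup_add s d h)

lemma pv_ext_ext (l : List (String × Option (List String))) : ∀ s : List String,
    ∃ t, l.foldl pvCollectStep s = s ++ t := by
  induction l with
  | nil => exact fun s => ⟨[], by simp⟩
  | cons kv rest ih =>
    intro s
    obtain ⟨t1, ht1⟩ : ∃ t, pvCollectStep s kv = s ++ t := by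
      cases hv : kv.2 with
      | none => exact ⟨[], by simp [pvCollectStep, hv]⟩
      | some deps => simpa [pvCollectStep, hv] using pv_adds_ext (kv.1 :: deps) s
    obtain ⟨t2, ht2⟩ := ih (pvCollectStep s kv)
    refine ⟨t1 ++ t2, ?_⟩
    rw [List.foldl_cons, ht2, ht1, List.append_assoc]

lemma pv_ext_nodup (l : List (String × Option (List String))) : ∀ s : List String,
    s.Nodup → (l.foldl pvCollectStep s).Nodup := by
  induction l with
  | nil => exact fun s h => h
  | cons kv rest ih =>
    intro s h
    refine ih _ ?_
    cases hv : kv.2 with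
    | none => simpa [pvCollectStep, hv] using h
    | some deps => simpa [pvCollectStep, hv] using pv_adds_nodup (kv.1 :: deps) s h

lemma pv_ids_snoc (s : List String) (x : String) :
    pvIds (s ++ [x]) = (pvIds s).insert x ("id" ++ PySem.Int.toStr (s.length : Int)) := by
  simp [pvIds, PySem.List.enumerate_append, List.foldl_append, PySem.List.enumerate_cons,
    PySem.List.enumerate_nil]

lemma pv_ids_get (s : List String) (h : s.Nodup) (k : String) :
    (pvIds s).get? k = (PySem.List.index? s k).map (fun i => "id" ++ PySem.Int.toStr (i : Int)) := by
  induction s using List.reverseRecOn with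
  | nil => rfl
  | append_singleton s x ih =>
    rw [List.nodup_append] at h
    obtain ⟨hs, -, hx⟩ := h
    have hxs : x ∉ s := fun hm => hx x hm x (by simp) rfl
    rw [pv_ids_snoc]
    by_cases hk : k = x
    · subst hk
      rw [PySem.List.index?_append_singleton_self s k hxs]
      simp
    · rw [PySem.Dict.get?_insert_of_ne _ _ hk]
      by_cases hm : k ∈ s
      · rw [PySem.List.index?_append_of_mem [x] hm, ih hs]
      · rw [pv_index_none (s ++ [x]) k (by simp [hm, hk]), ih hs, pv_index_none s k hm]

-- looked-up id of a name k already present in a prefix s of the final order ord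
lemma pv_getD_some (s ord : List String) (k : String) (i : Nat) (hord : ord.Nodup) (hm : k ∈ s)
    (t : List String) (hext : ord = s ++ t) (hi : PySem.List.index? s k = some i) :
    (pvIds ord).getD k "" = "id" ++ PySem.Int.toStr (i : Int) := by
  rw [pv_getD, pv_ids_get ord hord, hext, PySem.List.index?_append_of_mem t hm, hi]
  rfl

lemma pvAStep_some (st : String × Int × PySem.Dict String String)
    (kv : String × Option (List String)) (deps : List String) (cur : String)
    (hv : kv.2 = some deps) (h : st.2.2.get? kv.1 = some cur) :
    pvAStep st kv = deps.foldl (pvAInner kv.1 cur) st := by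
  simp [pvAStep, hv, h]

lemma pvAStep_newkey (st : String × Int × PySem.Dict String String)
    (kv : String × Option (List String)) (deps : List String)
    (hv : kv.2 = some deps) (h : st.2.2.get? kv.1 = none) :
    pvAStep st kv = deps.foldl (pvAInner kv.1 ("id" ++ PySem.Int.toStr st.2.1))
      (st.1, st.2.1 + 1, st.2.2.insert kv.1 ("id" ++ PySem.Int.toStr st.2.1)) := by
  simp [pvAStep, hv, h]

lemma pvAInner_old (key cur : String) (st : String × Int × PySem.Dict String String)
    (dep v : String) (h : st.2.2.get? dep = some v) :
    pvAInner key cur st dep =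
      (st.1 ++ "\t" ++ cur ++ "[\"" ++ key ++ "\"] --> " ++ v ++ "[\"" ++ dep ++ "\"];\n",
       st.2.1, st.2.2) := by
  simp [pvAInner, h]

lemma pvAInner_new (key cur : String) (st : String × Int × PySem.Dict String String)
    (dep : String) (h : st.2.2.get? dep = none) :
    pvAInner key cur st dep =
      (st.1 ++ "\t" ++ cur ++ "[\"" ++ key ++ "\"] --> " ++ ("id" ++ PySem.Int.toStr st.2.1) ++
        "[\"" ++ dep ++ "\"];\n",
       st.2.1 + 1, st.2.2.insert dep ("id" ++ PySem.Int.toStr st.2.1)) := by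
  simp [pvAInner, h]

lemma pv_inner (key cur_id : String) (deps : List String) :
    ∀ (s : List String) (res : String) (ord t : List String),
      s.Nodup → ord.Nodup → ord = deps.foldl PySem.Set.add s ++ t →
      cur_id = (pvIds ord).getD key "" →
      deps.foldl (pvAInner key cur_id) (res, (s.length : Int), pvIds s) =
        ((deps.map (pvLine (pvIds ord) key)).foldl (· ++ ·) res,
         ((deps.foldl PySem.Set.add s).length : Int), pvIds (deps.foldl PySem.Set.add s)) := by
  induction deps with
  | nil => intro s res ord t _ _ _ _; rfl
  | cons d ds ih =>
    intro s res ord t hs hord hext hcur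
    simp only [List.foldl_cons, List.map_cons] at hext ⊢
    by_cases hd : d ∈ s
    · obtain ⟨i, hi⟩ := pv_index_some s d hd
      have hadd : PySem.Set.add s d = s := pv_add_of_mem s d hd
      rw [hadd] at hext ⊢
      obtain ⟨u, hu⟩ := pv_adds_ext ds s
      have hword : ord = s ++ (u ++ t) := by rw [hext, hu, List.append_assoc]
      have hget : (pvIds s).get? d = some ("id" ++ PySem.Int.toStr (i : Int)) := by
        rw [pv_ids_get s hs, hi]; rfl
      have hdep := pv_getD_some s ord d i hord hd _ hword hi
      rw [pvAInner_old key cur_id _ d _ hget]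
      dsimp only
      have hline : res ++ "\t" ++ cur_id ++ "[\"" ++ key ++ "\"] --> " ++
          ("id" ++ PySem.Int.toStr (i : Int)) ++ "[\"" ++ d ++ "\"];\n" =
          res ++ pvLine (pvIds ord) key d := by
        simp [pvLine, hcur, hdep, String.append_assoc]
      rw [hline]
      exact ih s (res ++ pvLine (pvIds ord) key d) ord t hs hord hext hcur

    · have hadd : PySem.Set.add s d = s ++ [d] := pv_add_of_not_mem s d hd
      rw [hadd] at hext ⊢
      obtain ⟨u, hu⟩ := pv_adds_ext ds (s ++ [d])
      have hword : ord = (s ++ [d]) ++ (u ++ t) := by rw [hext, hu, List.append_assoc]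
      have hget : (pvIds s).get? d = none := by
        rw [pv_ids_get s hs, pv_index_none s d hd]; rfl
      have hdep := pv_getD_some (s ++ [d]) ord d s.length hord (by simp) _ hword
        (PySem.List.index?_append_singleton_self s d hd)
      rw [pvAInner_new key cur_id _ d hget]
      dsimp only
      have hnd1 : (s ++ [d]).Nodup := by
        rw [List.nodup_append]
        exact ⟨hs, List.nodup_singleton d, fun a ha b hb => by
          simp at hb; subst hb; exact fun h => hd (h ▸ ha)⟩
      have htup : ((res ++ "\t" ++ cur_id ++ "[\"" ++ key ++ "\"] --> " ++
            ("id" ++ PySem.Int.toStr ((s.length : Int))) ++ "[\"" ++ d ++ "\"];\n",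
            (s.length : Int) + 1, (pvIds s).insert d ("id" ++ PySem.Int.toStr ((s.length : Int))))
            : String × Int × PySem.Dict String String) =
          (res ++ pvLine (pvIds ord) key d, (((s ++ [d]).length : Nat) : Int), pvIds (s ++ [d])) := by
        refine Prod.ext ?_ (Prod.ext ?_ ?_)
        · simp [pvLine, hcur, hdep, String.append_assoc]
        · simp
        · simp [pv_ids_snoc]
      rw [htup]
      exact ih (s ++ [d]) (res ++ pvLine (pvIds ord) key d) ord t hnd1 hord hext hcur

lemma pv_main (l : List (String × Option (List String))) :
    ∀ (s : List String) (res : String) (ord t : List String),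
      s.Nodup → ord.Nodup → ord = l.foldl pvCollectStep s ++ t →
      l.foldl pvAStep (res, (s.length : Int), pvIds s) =
        ((l.flatMap (pvLines (pvIds ord))).foldl (· ++ ·) res,
         ((l.foldl pvCollectStep s).length : Int), pvIds (l.foldl pvCollectStep s)) := by
  induction l with
  | nil => intro s res ord t _ _ _; rfl
  | cons kv rest ih =>
    intro s res ord t hs hord hext
    simp only [List.foldl_cons, List.flatMap_cons] at hext ⊢
    cases hv : kv.2 with
    | none =>
      have hc : pvCollectStep s kv = s := by simp [pvCollectStep, hv]
      rw [hc] at hext ⊢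
      have hA : pvAStep (res, (s.length : Int), pvIds s) kv = (res, (s.length : Int), pvIds s) := by
        simp [pvAStep, hv]
      rw [hA, show pvLines (pvIds ord) kv = [] from by simp [pvLines, hv], List.nil_append]
      exact ih s res ord t hs hord hext
    | some deps =>
      have hc : pvCollectStep s kv = deps.foldl PySem.Set.add (PySem.Set.add s kv.1) := by
        simp [pvCollectStep, hv]
      rw [hc] at hext ⊢
      rw [show pvLines (pvIds ord) kv = deps.map (pvLine (pvIds ord) kv.1) from by
        simp [pvLines, hv], List.foldl_append]
      by_cases hk : kv.1 ∈ s
      · obtain ⟨i, hi⟩ := pv_index_some s kv.1 hk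
        have hadd : PySem.Set.add s kv.1 = s := pv_add_of_mem s kv.1 hk
        rw [hadd] at hext ⊢
        obtain ⟨w, hw⟩ := pv_adds_ext deps s
        obtain ⟨u, hu⟩ := pv_ext_ext rest (deps.foldl PySem.Set.add s)
        have hword : ord = s ++ (w ++ (u ++ t)) := by
          rw [hext, hu, hw, List.append_assoc, List.append_assoc]
        have hget : (pvIds s).get? kv.1 = some ("id" ++ PySem.Int.toStr (i : Int)) := by
          rw [pv_ids_get s hs, hi]; rfl
        have hcur : "id" ++ PySem.Int.toStr (i : Int) = (pvIds ord).getD kv.1 "" :=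
          (pv_getD_some s ord kv.1 i hord hk _ hword hi).symm
        rw [pvAStep_some _ kv deps _ hv hget]
        dsimp only
        rw [pv_inner kv.1 _ deps s res ord (u ++ t) hs hord
          (by rw [hext, hu, List.append_assoc]) hcur]
        exact ih (deps.foldl PySem.Set.add s) _ ord t (pv_adds_nodup deps s hs) hord hext
      · have hadd : PySem.Set.add s kv.1 = s ++ [kv.1] := pv_add_of_not_mem s kv.1 hk
        rw [hadd] at hext ⊢
        obtain ⟨w, hw⟩ := pv_adds_ext deps (s ++ [kv.1])
        obtain ⟨u, hu⟩ := pv_ext_ext rest (deps.foldl PySem.Set.add (s ++ [kv.1]))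
        have hword : ord = (s ++ [kv.1]) ++ (w ++ (u ++ t)) := by
          rw [hext, hu, hw, List.append_assoc, List.append_assoc]
        have hget : (pvIds s).get? kv.1 = none := by
          rw [pv_ids_get s hs, pv_index_none s kv.1 hk]; rfl
        have hcur : "id" ++ PySem.Int.toStr ((s.length : Int)) = (pvIds ord).getD kv.1 "" :=
          (pv_getD_some (s ++ [kv.1]) ord kv.1 s.length hord (by simp) _ hword
            (PySem.List.index?_append_singleton_self s kv.1 hk)).symm
        have hnd1 : (s ++ [kv.1]).Nodup := by
          rw [List.nodup_append]
          exact ⟨hs, List.nodup_singleton kv.1, fun a ha b hb => by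
            simp at hb; subst hb; exact fun h => hk (h ▸ ha)⟩
        rw [pvAStep_newkey _ kv deps hv hget]
        dsimp only
        have htup : ((res, (s.length : Int) + 1,
            (pvIds s).insert kv.1 ("id" ++ PySem.Int.toStr ((s.length : Int))))
              : String × Int × PySem.Dict String String) =
            (res, (((s ++ [kv.1]).length : Nat) : Int), pvIds (s ++ [kv.1])) := by
          refine Prod.ext rfl (Prod.ext ?_ ?_)
          · simp
          · simp [pv_ids_snoc]
        rw [htup]
        rw [pv_inner kv.1 _ deps (s ++ [kv.1]) res ord (u ++ t) hnd1 hord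
          (by rw [hext, hu, List.append_assoc]) hcur]
        exact ih (deps.foldl PySem.Set.add (s ++ [kv.1])) _ ord t
          (pv_adds_nodup deps _ hnd1) hord hext

lemma pv_blines (ids : PySem.Dict String String) (l : List (String × Option (List String))) :
    ∀ acc : List String, l.foldl (pvBLineStep ids) acc = acc ++ l.flatMap (pvLines ids) := by
  induction l with
  | nil => simp
  | cons kv rest ih =>
    intro acc
    cases hv : kv.2 with
    | none => simp [pvBLineStep, pvLines, hv, ih]
    | some deps => simp [pvBLineStep, pvLines, hv, ih]

-- ===== VERDICT (by name: the statement is the Claim_ definition above) =====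
theorem generate_graph_code_spec : Claim_equal_generate_graph_code := by
  intro dict _ _
  unfold Spec_generate_graph_code generate_graph_code generate_graph_code_alt
  have hnd : (pvCollect dict).Nodup := pv_ext_nodup dict [] List.nodup_nil
  have hmain := pv_main dict [] "flowchart TD;\n" (pvCollect dict) [] List.nodup_nil hnd
    (by simp [pvCollect, PySem.Set.empty])
  rw [pv_blines, pv_append_join]
  simpa [pvCollect, PySem.Set.empty, pvIds] using congrArg Prod.fst hmain
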